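-- pv_equiv track=rewrite | github.com/haoming-codes/time-to-rank | util.py | doSelection
-- ===== SOURCE A (Python) =====
-- def doSelection(start_rank):
--     sorted_list = sorted(start_rank)
--     if sorted_list == start_rank:
--         return None
--     # print start_rank
--     # print sorted_list
--     to_move = sorted_list[0]
--     for i in range(len(sorted_list)):
--         if sorted_list[i] == start_rank[i]:
--             continue
--         to_move = sorted_list[i]
--         break
--     # print to_move
--     end_rank = [i for i in start_rank if i < to_move]+[to_move]+[i for i in start_rank if i > to_move]
--     assert len(end_rank) == len(start_rank)
--     return end_rank
-- ===== SOURCE B (Python) =====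
-- def doSelection(start_rank):
--     # Find the first adjacent descent instead of sorting: if there is none, the
--     # list is already sorted.  The element to move is the minimum of the suffix
--     # after the descent (first occurrence: position j); the result is a copy
--     # with that element spliced out and re-inserted after the elements smaller
--     # than it (position k, inside the sorted prefix).
--     n = len(start_rank)
--     d = 0
--     while d + 1 < n and start_rank[d] <= start_rank[d + 1]:
--         d += 1
--     if d + 1 >= n:
--         return None
--     # when the descent is at the front (the common case) min() needs no slice:
--     # start_rank[0] > start_rank[1], so it cannot be the minimum anyway
--     to_move = min(start_rank) if d == 0 else min(start_rank[d + 1:])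
--     j = start_rank.index(to_move, d + 1)
--     k = 0
--     while k <= d and start_rank[k] < to_move:
--         k += 1
--     end_rank = list(start_rank)
--     end_rank.pop(j)
--     end_rank.insert(k, to_move)
--     return end_rank
-- ===== Notes on version B (the rewrite author's own statement) =====
-- stated objective: faster
-- what changed: B never sorts and never filters: one scan finds the first adjacent descent, built-in min/index over the suffix locate the element to move, a short scan of the sorted prefix finds its insertion point, and the result is built by splicing (pop + insert) instead of A's sort plus two filtering comprehensions; Pre_ excludes exactly the inputs where A's assert raises (unsorted input whose moved value is duplicated).
import Mathlib
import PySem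

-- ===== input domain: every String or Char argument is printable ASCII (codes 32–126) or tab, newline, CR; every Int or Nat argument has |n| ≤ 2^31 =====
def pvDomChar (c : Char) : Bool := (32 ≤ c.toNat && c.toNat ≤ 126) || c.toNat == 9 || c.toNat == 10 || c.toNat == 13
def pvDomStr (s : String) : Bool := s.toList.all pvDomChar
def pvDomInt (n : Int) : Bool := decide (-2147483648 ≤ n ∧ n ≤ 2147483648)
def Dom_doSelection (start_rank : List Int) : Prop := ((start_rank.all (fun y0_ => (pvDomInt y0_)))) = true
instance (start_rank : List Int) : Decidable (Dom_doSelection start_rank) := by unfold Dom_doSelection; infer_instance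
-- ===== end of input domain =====

-- B replaces A's sort-and-rebuild with a scan for the first adjacent descent and a splice
-- of the suffix minimum into the sorted prefix; outside Pre_ A's `assert` raises.

-- ===== PORT A =====
-- A's `for i in range(len(sorted_list))` loop: walk `sorted_list` and `start_rank` in
-- parallel, `continue` on equal entries, `break` with the first mismatching sorted entry.
def aFind : List Int → List Int → Option Int
  | s :: ss, t :: ts => if s = t then aFind ss ts else some s
  | _, _ => none

def doSelection (start_rank : List Int) : Option (List Int) :=
  let sorted_list := PySem.List.sorted start_rank (fun x => x)
  if sorted_list = start_rank then none
  else
    -- `to_move = sorted_list[0]`, possibly overwritten by the loop's `break`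
    let to_move := (aFind sorted_list start_rank).getD (PySem.List.pyGetD sorted_list 0 0)
    -- `assert len(end_rank) == len(start_rank)` raises exactly outside Pre_doSelection; omitted
    some ((start_rank.filter (fun i => decide (i < to_move))) ++
          to_move :: (start_rank.filter (fun i => decide (to_move < i))))

-- ===== PORT B =====
-- B's `while d + 1 < n and start_rank[d] <= start_rank[d+1]: d += 1` loop, returning
-- `None` for `d + 1 >= n` and the final `d` otherwise (indices are in range: `getD`).
def bDescent (xs : List Int) (d : Nat) : Option Nat :=
  if _h : d + 1 < xs.length then
    if xs.getD d 0 ≤ xs.getD (d + 1) 0 then bDescent xs (d + 1) else some d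
  else none
termination_by xs.length - d

-- B's `while k <= d and start_rank[k] < to_move: k += 1` loop (indices are in range).
def bLow (xs : List Int) (t : Int) (d k : Nat) : Nat :=
  if _h : k ≤ d ∧ xs.getD k 0 < t then bLow xs t d (k + 1) else k
termination_by d + 1 - k

def doSelection_alt (start_rank : List Int) : Option (List Int) :=
  match bDescent start_rank 0 with
  | none => none
  | some d =>
    -- `min(start_rank) if d == 0 else min(start_rank[d + 1:])` (slices are drop)
    let to_move := (PySem.List.min? (if d = 0 then start_rank else start_rank.drop (d + 1))
                     (fun y => y)).getD 0
    -- `start_rank.index(to_move, d + 1)` = d+1 + first index of to_move in the suffix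
    -- (exact: the start argument is nonnegative and to_move occurs in the suffix)
    let j := d + 1 + (PySem.List.index? (start_rank.drop (d + 1)) to_move).getD 0
    let k := bLow start_rank to_move d 0
    -- `end_rank = list(start_rank)` then `end_rank.pop(j)`, `end_rank.insert(k, to_move)`
    match PySem.List.pop? start_rank (j : Int) with
    | none => none  -- unreachable: j < len(start_rank), Python's pop cannot raise here
    | some (_, popped) => some (PySem.List.insert popped (k : Int) to_move)

-- ===== PRECONDITION & SPEC =====
-- Pre_ excludes exactly the inputs where A's `assert` raises AssertionError: the list is
-- unsorted and the value to move (the minimum of the suffix from the first inversion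
-- position) occurs more than once, so A's rebuilt list silently drops the extra copies.
def Pre_doSelection (start_rank : List Int) : Prop :=
  List.Pairwise (· ≤ ·) start_rank ∨
  ∀ j : Fin start_rank.length,
    ((∃ k : Fin start_rank.length, j < k ∧ start_rank[k] < start_rank[j]) ∧
     ∀ i : Fin start_rank.length, i < j → ∀ k : Fin start_rank.length, i < k → start_rank[i] ≤ start_rank[k]) →
    start_rank.count (((start_rank.drop j).min?).getD 0) = 1
instance (start_rank : List Int) : Decidable (Pre_doSelection start_rank) := by
  unfold Pre_doSelection; infer_instance
def pvWitness_doSelection : List Int := [2, 1, 3]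

def Spec_doSelection (start_rank : List Int) (out : Option (List Int)) : Prop := out = doSelection_alt start_rank
instance (start_rank : List Int) (out : Option (List Int)) : Decidable (Spec_doSelection start_rank out) := by unfold Spec_doSelection; infer_instance

-- ===== CLAIM (what is proved, stated in full; the proofs are below) =====
def Claim_equal_doSelection : Prop := ∀ (start_rank : List Int), Dom_doSelection start_rank → Pre_doSelection start_rank → Spec_doSelection start_rank (doSelection start_rank)

-- ===== LEMMAS AND PROOFS =====

-- A's mismatch loop ignores a common prefix.
theorem aFind_prefix (l a b : List Int) : aFind (l ++ a) (l ++ b) = aFind a b := by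
  induction l with
  | nil => rfl
  | cons c l ih => simp [aFind, ih]

-- Removing an element of the right part of an append.
theorem eraseIdx_append_add (l r : List Int) (q : Nat) :
    (l ++ r).eraseIdx (l.length + q) = l ++ r.eraseIdx q := by
  induction l with
  | nil => simp
  | cons c l ih => simpa [Nat.succ_add] using ih

-- If B's descent scan returns none, all adjacent pairs from d0 on are nondecreasing.
theorem bDescent_none_spec (xs : List Int) : ∀ d0, bDescent xs d0 = none →
    ∀ i, d0 ≤ i → i + 1 < xs.length → xs.getD i 0 ≤ xs.getD (i + 1) 0 := by
  intro d0
  fun_induction bDescent xs d0 with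
  | case1 d h hle ih =>
    intro hnone i hi hilen
    rcases Nat.eq_or_lt_of_le hi with rfl | hlt
    · exact hle
    · exact ih hnone i hlt hilen
  | case2 d h hgt => intro hnone; simp at hnone
  | case3 d h =>
    intro _ i hi hilen
    omega

-- If B's descent scan returns d, pairs before d are nondecreasing and d is a descent.
theorem bDescent_some_spec (xs : List Int) : ∀ d0 d, bDescent xs d0 = some d →
    d0 ≤ d ∧ d + 1 < xs.length ∧
    (∀ i, d0 ≤ i → i < d → xs.getD i 0 ≤ xs.getD (i + 1) 0) ∧
    xs.getD (d + 1) 0 < xs.getD d 0 := by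
  intro d0 d
  fun_induction bDescent xs d0 with
  | case1 d0 h hle ih =>
    intro hsome
    obtain ⟨h1, h2, h3, h4⟩ := ih hsome
    refine ⟨by omega, h2, ?_, h4⟩
    intro i hi hid
    rcases Nat.eq_or_lt_of_le hi with rfl | hlt
    · exact hle
    · exact h3 i hlt hid
  | case2 d0 h hgt =>
    intro hsome
    obtain rfl := Option.some.inj hsome
    exact ⟨le_refl _, h, fun i hi hid => by omega, by omega⟩
  | case3 d0 h => intro hsome; simp at hsome

-- Adjacent nondecreasing entries make the list pairwise nondecreasing.
theorem pairwise_of_adj (l : List Int)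
    (h : ∀ i, i + 1 < l.length → l.getD i 0 ≤ l.getD (i + 1) 0) :
    List.Pairwise (· ≤ ·) l := by
  refine List.IsChain.pairwise (List.isChain_iff_getElem.mpr ?_)
  intro i hi
  have := h i hi
  rwa [List.getD_eq_getElem _ _ (by omega), List.getD_eq_getElem _ _ hi] at this

-- B's lower-scan loop: everything before the result is < t, the result entry is not.
theorem bLow_spec (xs : List Int) (t : Int) (d : Nat) : ∀ k0, k0 ≤ d + 1 →
    k0 ≤ bLow xs t d k0 ∧ bLow xs t d k0 ≤ d + 1 ∧
    (∀ i, k0 ≤ i → i < bLow xs t d k0 → xs.getD i 0 < t) ∧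
    (bLow xs t d k0 ≤ d → ¬ (xs.getD (bLow xs t d k0) 0 < t)) := by
  intro k0
  fun_induction bLow xs t d k0 with
  | case1 k h ih =>
    intro hk
    obtain ⟨h1, h2, h3, h4⟩ := ih (by omega)
    refine ⟨by omega, h2, ?_, h4⟩
    intro i hi hilt
    rcases Nat.eq_or_lt_of_le hi with rfl | hlt
    · exact h.2
    · exact h3 i hlt hilt
  | case2 k h =>
    intro hk
    refine ⟨le_refl _, hk, fun i hi hilt => by omega, fun hkd => ?_⟩
    intro hcon
    exact h ⟨hkd, hcon⟩

-- A returns the stable three-way partition around the minimum m of the suffix, and the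
-- input splits as lo ++ h1 :: hi2 ++ suf with lo ≤ m below the first element above m.
theorem aSide (xs P : List Int) (x m h0 : Int) (t' suf : List Int)
    (heq : xs = P ++ x :: suf) (hpw : List.Pairwise (· ≤ ·) (P ++ [x]))
    (hsuf : suf = h0 :: t') (hlt : h0 < x)
    (hm : PySem.List.min? suf (fun y => y) = some m) :
    ∃ lo h1 hi2,
      P ++ [x] = lo ++ h1 :: hi2 ∧
      (∀ a ∈ lo, a ≤ m) ∧ List.Pairwise (· ≤ ·) lo ∧ (∀ a ∈ h1 :: hi2, m < a) ∧
      doSelection xs = some (List.filter (fun i => decide (i < m)) xs ++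
                             m :: List.filter (fun i => decide (m < i)) xs) := by
  have hmmem : m ∈ suf := PySem.List.min?_mem hm
  have hmmin : ∀ y ∈ suf, m ≤ y := PySem.List.min?_isMin hm
  have hmx : m < x := lt_of_le_of_lt (hmmin h0 (by simp [hsuf])) hlt
  set Q : List Int := P ++ [x] with hQ
  set lo : List Int := Q.takeWhile (fun a => decide (a ≤ m)) with hlo
  set hi : List Int := Q.dropWhile (fun a => decide (a ≤ m)) with hhi
  have hQsplit : lo ++ hi = Q := List.takeWhile_append_dropWhile
  have hine : hi ≠ [] := by
    intro hnil
    have : x ∈ lo := by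
      have : x ∈ Q := by simp [hQ]
      rw [← hQsplit, hnil] at this; simpa using this
    have := List.mem_takeWhile_imp this
    simp at this; omega
  have hhead : decide (((hi).head hine) ≤ m) = false := List.head_dropWhile_not _ hine
  obtain ⟨h1, hi2, hhi2⟩ : ∃ h1 hi2, hi = h1 :: hi2 := by
    cases hcc : hi with
    | nil => exact absurd hcc hine
    | cons a b => exact ⟨a, b, rfl⟩
  have hmh1 : m < h1 := by
    have h2 : hi.head hine = h1 := by simp [hhi2]
    rw [h2] at hhead; simp at hhead; omega
  have hQpw : List.Pairwise (· ≤ ·) Q := hpw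
  have hlopw : List.Pairwise (· ≤ ·) lo := List.Pairwise.sublist (List.takeWhile_sublist _) hQpw
  have hlome : ∀ a ∈ lo, a ≤ m := by
    intro a ha
    have := List.mem_takeWhile_imp ha; simpa using this
  have hQpw' : List.Pairwise (· ≤ ·) (lo ++ hi) := hQsplit ▸ hQpw
  obtain ⟨_, hhipw, hcross⟩ := List.pairwise_append.mp hQpw'
  have hhime : ∀ a ∈ hi, m < a := by
    intro a ha
    rw [hhi2] at ha hhipw
    rcases List.mem_cons.mp ha with rfl | ha'
    · exact hmh1
    · exact lt_of_lt_of_le hmh1 (List.rel_of_pairwise_cons hhipw ha')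
  have hsorted : PySem.List.sorted xs (fun x => x) =
      lo ++ PySem.List.sorted (hi ++ suf) (fun x => x) := by
    apply PySem.List.sorted_id_eq_of_perm_of_pairwise
    · calc (lo ++ PySem.List.sorted (hi ++ suf) (fun x => x)).Perm (lo ++ (hi ++ suf)) :=
            List.Perm.append_left lo (PySem.List.sorted_perm (hi ++ suf) (fun x => x) false)
        _ = (lo ++ hi) ++ suf := by rw [List.append_assoc]
        _ = xs := by rw [hQsplit, heq, hQ]; simp
    · refine List.pairwise_append.mpr ⟨hlopw, PySem.List.sorted_pairwise _ _, ?_⟩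
      intro a ha b hbmem
      have hb' : b ∈ hi ++ suf := (PySem.List.mem_sorted _ _ _ b).mp hbmem
      rcases List.mem_append.mp hb' with hbh | hbs
      · exact le_of_lt (lt_of_le_of_lt (hlome a ha) (hhime b hbh))
      · exact le_trans (hlome a ha) (hmmin b hbs)
  obtain ⟨c, rest, hcr⟩ : ∃ c rest, PySem.List.sorted (hi ++ suf) (fun x => x) = c :: rest := by
    cases hcc : PySem.List.sorted (hi ++ suf) (fun x => x) with
    | nil =>
      rw [PySem.List.sorted_eq_nil_iff] at hcc
      rw [hhi2] at hcc; simp at hcc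
    | cons a b => exact ⟨a, b, rfl⟩
  have hcm : c = m := by
    have hle : c ≤ m := PySem.List.key_head_sorted_le _ _ hcr m (List.mem_append.mpr (Or.inr hmmem))
    have hcmem : c ∈ hi ++ suf := (PySem.List.mem_sorted _ _ _ c).mp (by rw [hcr]; simp)
    rcases List.mem_append.mp hcmem with hch | hcs
    · exact absurd (hhime c hch) (by omega)
    · exact le_antisymm hle (hmmin c hcs)
  subst hcm
  have hxs_split : xs = lo ++ (h1 :: (hi2 ++ suf)) := by
    have h3 : P ++ x :: suf = Q ++ suf := by rw [hQ]; simp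
    rw [heq, h3, ← hQsplit, hhi2]; simp
  have hsorted' : PySem.List.sorted xs (fun x => x) = lo ++ (c :: rest) := by
    rw [hsorted, hcr]
  have hne : PySem.List.sorted xs (fun x => x) ≠ xs := by
    rw [hsorted', hxs_split]
    intro hcon
    have := List.append_cancel_left hcon
    have : c = h1 := by injection this
    omega
  have hafind : aFind (PySem.List.sorted xs (fun x => x)) xs = some c := by
    rw [hsorted', hxs_split, aFind_prefix]
    have : c ≠ h1 := by omega
    simp [aFind, this]
  refine ⟨lo, h1, hi2, by rw [← hQsplit, hhi2], hlome, hlopw, ?_, ?_⟩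
  · intro a ha; exact hhime a (hhi2 ▸ ha)
  · simp only [doSelection, hne, hafind]
    rfl

-- The two ports agree on every input satisfying Pre_ (where Python A returns normally).
theorem ports_eq (xs : List Int) (hpre : Pre_doSelection xs) :
    doSelection xs = doSelection_alt xs := by
  cases hb : bDescent xs 0 with
  | none =>
    have hadj := bDescent_none_spec xs 0 hb
    have hpw : List.Pairwise (· ≤ ·) xs := pairwise_of_adj xs (fun i hi => hadj i (Nat.zero_le _) hi)
    have hs : PySem.List.sorted xs (fun x => x) = xs :=
      PySem.List.sorted_eq_self_of_pairwise xs _ hpw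
    simp [doSelection, doSelection_alt, hb, hs]
  | some d =>
    obtain ⟨-, hd1, hadj, hdesc⟩ := bDescent_some_spec xs 0 d hb
    -- decomposition xs = P ++ x :: suf with sorted prefix P ++ [x] and descent to suf
    set P : List Int := xs.take d with hP
    set x : Int := xs.getD d 0 with hx
    set suf : List Int := xs.drop (d + 1) with hsufdef
    have hxe : x = xs[d]'(by omega) := List.getD_eq_getElem xs 0 (by omega)
    have hQ : xs.take (d + 1) = P ++ [x] := by
      rw [hP, hxe, List.take_add_one]
      simp [List.getElem?_eq_getElem (show d < xs.length by omega)]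
    have heq : xs = P ++ x :: suf := by
      calc xs = xs.take (d + 1) ++ xs.drop (d + 1) := (List.take_append_drop _ _).symm
        _ = (P ++ [x]) ++ suf := by rw [hQ]
        _ = P ++ x :: suf := by simp
    have hQlen : (P ++ [x]).length = d + 1 := by
      rw [← hQ]; exact List.length_take_of_le (by omega)
    have hQget : ∀ i (hi : i < d + 1), (P ++ [x])[i]'(by omega) = xs[i]'(by omega) := by
      intro i hi
      exact (List.getElem_of_eq hQ.symm (by rw [hQlen]; omega)).trans
        List.getElem_take
    have hpw : List.Pairwise (· ≤ ·) (P ++ [x]) := by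
      apply pairwise_of_adj
      intro i hi
      rw [hQlen] at hi
      rw [List.getD_eq_getElem _ _ (by omega), List.getD_eq_getElem _ _ (by rw [hQlen]; omega),
          hQget i (by omega), hQget (i + 1) (by omega)]
      have := hadj i (Nat.zero_le _) (by omega)
      rwa [List.getD_eq_getElem _ _ (by omega), List.getD_eq_getElem _ _ (by omega)] at this
    obtain ⟨h0, t', hsuf⟩ : ∃ h0 t', suf = h0 :: t' := by
      cases hcc : suf with
      | nil => exfalso; have := congrArg List.length hcc; simp [hsufdef] at this; omega
      | cons a b => exact ⟨a, b, rfl⟩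
    have hh0 : h0 = xs.getD (d + 1) 0 := by
      have h4 : suf[0]'(by simp [hsufdef]; omega) = xs[d + 1]'(by omega) := by
        have := List.getElem_of_eq hsufdef (i := 0) (by simp [hsufdef]; omega)
        rw [this, List.getElem_drop]
      have h5 : suf[0]'(by simp [hsufdef]; omega) = h0 :=
        (List.getElem_of_eq hsuf (by simp [hsufdef]; omega)).trans (by simp)
      rw [← h5, h4, List.getD_eq_getElem _ _ (by omega)]
    have hlt : h0 < x := by rw [hh0, hx]; exact hdesc
    obtain ⟨m, hm⟩ : ∃ m, PySem.List.min? suf (fun y => y) = some m := by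
      rw [hsuf]; exact ⟨_, PySem.List.min?_id_cons h0 t'⟩
    have hmmem : m ∈ suf := PySem.List.min?_mem hm
    have hmmin : ∀ y ∈ suf, m ≤ y := PySem.List.min?_isMin hm
    obtain ⟨lo, h1, hi2, hQsplit, hlome, hlopw, hhime, hA⟩ :=
      aSide xs P x m h0 t' suf heq hpw hsuf hlt hm
    have hxs_split : xs = lo ++ h1 :: (hi2 ++ suf) := by
      rw [heq]
      calc P ++ x :: suf = (P ++ [x]) ++ suf := by simp
        _ = (lo ++ h1 :: hi2) ++ suf := by rw [hQsplit]
        _ = lo ++ h1 :: (hi2 ++ suf) := by simp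
    have hlolen : lo.length + 1 ≤ xs.length := by
      have := congrArg List.length hxs_split; simp at this; omega
    have hmnotlo : ∀ a ∈ lo, a ≤ m := hlome
    have hmh1 : m < h1 := hhime h1 (by simp)
    have hxg : xs[lo.length]'(by omega) = h1 := by
      rw [List.getElem_of_eq hxs_split, List.getElem_append_right (le_refl _)]
      simp
    -- Pre_ gives that m occurs exactly once in xs
    have hcount : xs.count m = 1 := by
      rcases hpre with hsorted_all | h2
      · exfalso
        have hpg := List.pairwise_iff_getElem.mp hsorted_all d (d + 1) (by omega) (by omega) (by omega)
        rw [List.getD_eq_getElem _ _ (by omega), hxe] at hdesc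
        omega
      · obtain ⟨q, hq, hqv⟩ := List.mem_iff_getElem.mp (List.mem_append_right hi2 hmmem)
        have hxslen : xs.length = lo.length + 1 + (hi2.length + suf.length) := by
          have := congrArg List.length hxs_split; simp at this; omega
        have hklen : lo.length + 1 + q < xs.length := by
          simp at hq; omega
        have hxk : xs[lo.length + 1 + q]'hklen = (hi2 ++ suf)[q]'hq := by
          rw [List.getElem_of_eq hxs_split hklen, List.getElem_append_right (by omega)]
          have hidx : lo.length + 1 + q - lo.length = q + 1 := by omega
          simp [hidx]
        have hval : xs[lo.length + 1 + q]'hklen < xs[lo.length]'(by omega) := by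
          rw [hxk, hxg, hqv]; exact hmh1
        have hmono : ∀ i : Fin xs.length, i < (⟨lo.length, by omega⟩ : Fin xs.length) →
            ∀ k : Fin xs.length, i < k → xs[i] ≤ xs[k] := by
          intro i hij k hik
          simp only [Fin.getElem_fin]
          have hilo : (i : Nat) < lo.length := hij
          have hxi : xs[(i : Nat)]'(i.isLt) = lo[(i : Nat)]'(hilo) := by
            rw [List.getElem_of_eq hxs_split, List.getElem_append_left hilo]
          have hxile : xs[(i : Nat)]'(i.isLt) ≤ m :=
            hxi ▸ hmnotlo _ (List.getElem_mem hilo)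
          by_cases hklo : (k : Nat) < lo.length
          · rw [hxi, List.getElem_of_eq hxs_split, List.getElem_append_left hklo]
            exact List.pairwise_iff_getElem.mp hlopw i k hilo hklo hik
          · have hxkmem : xs[(k : Nat)]'(k.isLt) ∈ h1 :: (hi2 ++ suf) := by
              rw [List.getElem_of_eq hxs_split, List.getElem_append_right (by omega)]
              exact List.getElem_mem _
            have : m ≤ xs[(k : Nat)]'(k.isLt) := by
              rcases List.mem_cons.mp hxkmem with he | he
              · rw [he]; omega
              · rcases List.mem_append.mp he with he2 | he2
                · exact le_of_lt (hhime _ (List.mem_cons_of_mem _ he2))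
                · exact hmmin _ he2
            omega
        have hres := h2 ⟨lo.length, by omega⟩
          ⟨⟨⟨lo.length + 1 + q, hklen⟩, Fin.mk_lt_mk.mpr (by omega), by
            simpa only [Fin.getElem_fin] using hval⟩, hmono⟩
        have hdropeq : xs.drop lo.length = h1 :: (hi2 ++ suf) := by
          rw [hxs_split]; exact List.drop_left' rfl
        have hminval : (xs.drop lo.length).min? = some m := by
          rw [hdropeq]
          rw [List.min?_eq_some_iff]
          constructor
          · exact List.mem_cons_of_mem _ (List.mem_append_right hi2 hmmem)
          · intro b hbmem
            rcases List.mem_cons.mp hbmem with he | he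
            · rw [he]; omega
            · rcases List.mem_append.mp he with he2 | he2
              · exact le_of_lt (hhime _ (List.mem_cons_of_mem _ he2))
              · exact hmmin _ he2
        simpa [hminval] using hres
    -- m occurs only in suf, and once there
    have hxs_split2 : xs = (lo ++ h1 :: hi2) ++ suf := by
      rw [heq]
      calc P ++ x :: suf = (P ++ [x]) ++ suf := by simp
        _ = (lo ++ h1 :: hi2) ++ suf := by rw [hQsplit]
    have hcsplit : lo.count m + ((h1 :: hi2).count m + suf.count m) = 1 := by
      rw [hxs_split2, List.count_append, List.count_append] at hcount
      omega
    have hsufpos : 0 < suf.count m := List.count_pos_iff.mpr hmmem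
    have hhicz : (h1 :: hi2).count m = 0 := by omega
    have hlocz : lo.count m = 0 := by omega
    have hsufone : suf.count m = 1 := by omega
    have hmlo : m ∉ lo := List.count_eq_zero.mp hlocz
    have hlolt : ∀ a ∈ lo, a < m := fun a ha =>
      lt_of_le_of_ne (hlome a ha) (fun hae => hmlo (hae ▸ ha))
    -- the first occurrence of m in suf
    obtain ⟨j0, hj0⟩ : ∃ j0, PySem.List.index? suf m = some j0 := by
      cases hcc : PySem.List.index? suf m with
      | none => exact absurd ((PySem.List.index?_eq_none_iff suf m).mp hcc) (by simp [hmmem])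
      | some a => exact ⟨a, rfl⟩
    obtain ⟨pre2, suf2, hsufsplit, hpre2len, hmpre2⟩ :=
      (PySem.List.index?_eq_some_iff suf m j0).mp hj0
    have hsufc : pre2.count m + (suf2.count m + 1) = 1 := by
      rw [hsufsplit] at hsufone
      simpa [List.count_append, List.count_cons] using hsufone
    have hmsuf2 : m ∉ suf2 := List.count_eq_zero.mp (by omega)
    have hpre2gt : ∀ a ∈ pre2, m < a := by
      intro a ha
      refine lt_of_le_of_ne (hmmin a (by rw [hsufsplit]; exact List.mem_append_left _ ha)) ?_
      intro hae; exact hmpre2 (hae ▸ ha)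
    have hsuf2gt : ∀ a ∈ suf2, m < a := by
      intro a ha
      refine lt_of_le_of_ne (hmmin a (by rw [hsufsplit]; simp [ha])) ?_
      intro hae; exact hmsuf2 (hae ▸ ha)
    -- A's two filters
    have hfl : xs.filter (fun i => decide (i < m)) = lo := by
      rw [hxs_split]
      rw [List.filter_append, List.filter_cons_of_neg (by simp; omega)]
      rw [List.filter_eq_self.mpr (fun a ha => by simp [hlolt a ha])]
      rw [List.filter_eq_nil_iff.mpr ?_]
      · simp
      · intro a ha
        rcases List.mem_append.mp ha with he | he
        · have := hhime a (List.mem_cons_of_mem _ he); simp; omega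
        · have := hmmin a he; simp; omega
    have hfg : xs.filter (fun i => decide (m < i)) = (h1 :: hi2) ++ (pre2 ++ suf2) := by
      rw [hxs_split2, List.filter_append, List.filter_append]
      rw [List.filter_eq_nil_iff.mpr (fun a ha => by have := hlolt a ha; simp; omega)]
      rw [List.filter_eq_self.mpr (fun a ha => by simp [hhime a ha])]
      rw [hsufsplit, List.filter_append, List.filter_cons_of_neg (by simp)]
      rw [List.filter_eq_self.mpr (fun a ha => by simp [hpre2gt a ha])]
      rw [List.filter_eq_self.mpr (fun a ha => by simp [hsuf2gt a ha])]
      simp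
    -- B's intermediate values
    have hto : (PySem.List.min? (if d = 0 then xs else xs.drop (d + 1)) (fun y => y)).getD 0 = m := by
      by_cases hd0 : d = 0
      · subst hd0
        have hxcons : xs = x :: suf := by
          rw [heq, hP]; simp
        rw [if_pos rfl]
        obtain ⟨m', hm'⟩ : ∃ m', PySem.List.min? xs (fun y => y) = some m' := by
          rw [hxcons]; exact ⟨_, PySem.List.min?_id_cons x suf⟩
        rw [hm']
        have hle1 : m' ≤ m := PySem.List.min?_isMin hm' m (by rw [hxcons]; exact List.mem_cons_of_mem _ hmmem)
        have hle2 : m ≤ m' := by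
          have hmem' := PySem.List.min?_mem hm'
          rw [hxcons] at hmem'
          rcases List.mem_cons.mp hmem' with he | he
          · have hmx : m < x := lt_of_le_of_lt (hmmin h0 (by simp [hsuf])) hlt
            rw [he]; omega
          · exact hmmin _ he
        simp [le_antisymm hle1 hle2]
      · rw [if_neg hd0, ← hsufdef, hm]; rfl
    have hjv : (PySem.List.index? (xs.drop (d + 1)) m).getD 0 = j0 := by
      rw [← hsufdef, hj0]; rfl
    have hQlen2 : lo.length + (h1 :: hi2).length = d + 1 := by
      have h6 := congrArg List.length hQsplit
      simp at h6 hQlen ⊢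
      omega
    have hloled : lo.length ≤ d := by simp at hQlen2; omega
    have hk : bLow xs m d 0 = lo.length := by
      obtain ⟨-, hk1, hk2, hk3⟩ := bLow_spec xs m d 0 (by omega)
      by_contra hne2
      rcases Nat.lt_or_ge (bLow xs m d 0) lo.length with hlt2 | hge
      · have hkd : bLow xs m d 0 ≤ d := by omega
        have hstop := hk3 hkd
        have hkx : xs.getD (bLow xs m d 0) 0 = lo[bLow xs m d 0]'hlt2 := by
          rw [List.getD_eq_getElem _ _ (by omega), List.getElem_of_eq hxs_split,
              List.getElem_append_left hlt2]
        exact hstop (by rw [hkx]; exact hlolt _ (List.getElem_mem hlt2))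
      · have hgt2 : lo.length < bLow xs m d 0 := by omega
        have := hk2 lo.length (Nat.zero_le _) hgt2
        rw [List.getD_eq_getElem _ _ (by omega), hxg] at this
        omega
    have hsuflen : suf.length = xs.length - (d + 1) := by rw [hsufdef]; simp
    have hj0lt : j0 < suf.length := by
      have := congrArg List.length hsufsplit
      simp at this; omega
    have hjlen : d + 1 + j0 < xs.length := by omega
    -- evaluate B
    have hB : doSelection_alt xs =
        some (PySem.List.insert (xs.eraseIdx (d + 1 + j0)) ((lo.length : Nat) : Int) m) := by
      simp only [doSelection_alt, hb, hto, hjv, hk]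
      rw [PySem.List.pop?_natCast xs (d + 1 + j0) hjlen]
    have hpopped : xs.eraseIdx (d + 1 + j0) = (lo ++ h1 :: hi2) ++ (pre2 ++ suf2) := by
      rw [hxs_split2, hsufsplit]
      have hlen3 : (lo ++ h1 :: hi2).length = d + 1 := by simpa using hQlen2
      rw [show d + 1 + j0 = (lo ++ h1 :: hi2).length + j0 by omega]
      rw [eraseIdx_append_add]
      congr 1
      rw [show j0 = pre2.length + 0 by omega, eraseIdx_append_add]
      simp
    have hinsert : PySem.List.insert ((lo ++ h1 :: hi2) ++ (pre2 ++ suf2)) ((lo.length : Nat) : Int) m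
        = lo ++ m :: ((h1 :: hi2) ++ (pre2 ++ suf2)) := by
      rw [PySem.List.insert_natCast _ _ _ (by simp)]
      rw [List.append_assoc, List.take_left, List.drop_left]
    rw [hA, hB, hpopped, hinsert, hfl, hfg]

-- ===== VERDICT (by name: the statement is the Claim_ definition above) =====
theorem doSelection_spec : Claim_equal_doSelection := by
  intro xs _ hpre
  unfold Spec_doSelection
  exact ports_eq xs hpre
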